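-- pv_equiv track=rewrite | github.com/Deepakchandhru/platoon_FYP | python_platoon/sumo_integrated.py | resolve_side_spawn_edge
-- ===== SOURCE A (Python) =====
-- def resolve_side_spawn_edge(side_idx, edges_graph, candidate_edge):
--     try:
--         if not edges_graph:
--             return candidate_edge
--         key = "side1" if side_idx == 1 else "side2"
--         for e in edges_graph.keys():
--             if key in e:
--                 return e
--         target_end = f"s{side_idx}b"; target_start = f"s{side_idx}a"
--         for e, (fr, to) in edges_graph.items():
--             if to == target_end or fr == target_start:
--                 return e
--     except Exception:
--         pass
--     return candidate_edge
-- ===== SOURCE B (Python) =====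
-- def resolve_side_spawn_edge(side_idx, edges_graph, candidate_edge):
--     if not edges_graph:
--         return candidate_edge
--     key = "side1" if side_idx == 1 else "side2"
--     target_start = f"s{side_idx}a"
--     target_end = f"s{side_idx}b"
--     fallback = None
--     for e, val in edges_graph.items():
--         if key in e:
--             return e
--         if fallback is None:
--             fr, to = val
--             if to == target_end or fr == target_start:
--                 fallback = e
--     return fallback if fallback is not None else candidate_edge
-- ===== Notes on version B (the rewrite author's own statement) =====
-- stated objective: simpler
-- what changed: Replaces A's two sequential scans (first over keys for the side-key substring, then over items for matching endpoints) by a single pass that returns a key match immediately and records the first endpoint match as a fallback, returned after the loop; the try/except wrapper is dropped since no exception can occur on well-typed dict-of-string-pairs input.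
import Mathlib
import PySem

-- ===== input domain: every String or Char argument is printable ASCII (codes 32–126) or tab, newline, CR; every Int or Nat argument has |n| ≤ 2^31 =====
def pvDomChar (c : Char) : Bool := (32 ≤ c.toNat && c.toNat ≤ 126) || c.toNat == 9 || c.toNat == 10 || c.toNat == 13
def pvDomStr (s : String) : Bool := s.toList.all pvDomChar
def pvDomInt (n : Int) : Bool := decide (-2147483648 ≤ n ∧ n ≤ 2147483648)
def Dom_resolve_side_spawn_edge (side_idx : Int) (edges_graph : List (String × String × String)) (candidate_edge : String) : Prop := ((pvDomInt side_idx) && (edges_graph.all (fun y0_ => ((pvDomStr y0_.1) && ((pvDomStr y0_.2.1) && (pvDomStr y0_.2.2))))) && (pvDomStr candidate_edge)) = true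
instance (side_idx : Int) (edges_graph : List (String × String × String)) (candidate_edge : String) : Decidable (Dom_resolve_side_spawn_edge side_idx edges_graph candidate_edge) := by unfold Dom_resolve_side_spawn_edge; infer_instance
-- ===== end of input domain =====

-- B replaces A's two sequential scans by one pass that returns a key match at once and
-- records the first endpoint match as a fallback (objective: simpler, one loop instead of two).

-- ===== PORT A =====
-- first loop of A: first key containing `key`
def pvScanKey (key : String) : List (String × String × String) → Option String
  | [] => none
  | (e, _, _) :: rest => if PySem.Str.isIn key e then some e else pvScanKey key rest

-- second loop of A: first edge whose endpoints match
def pvScanEnds (ts te : String) : List (String × String × String) → Option String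
  | [] => none
  | (e, fr, t) :: rest => if t == te || fr == ts then some e else pvScanEnds ts te rest

def resolve_side_spawn_edge (side_idx : Int) (edges_graph : List (String × String × String)) (candidate_edge : String) : String :=
  if edges_graph = [] then candidate_edge
  else
    let key := if side_idx == 1 then "side1" else "side2"
    match pvScanKey key edges_graph with
    | some e => e
    | none =>
      let target_end := "s" ++ PySem.Int.toStr side_idx ++ "b"
      let target_start := "s" ++ PySem.Int.toStr side_idx ++ "a"
      match pvScanEnds target_start target_end edges_graph with
      | some e => e
      | none => candidate_edge

-- ===== PORT B =====
-- B's single loop: return a key match at once, else remember the first endpoint match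
def pvAltLoop (key ts te candidate_edge : String) (fallback : Option String) :
    List (String × String × String) → String
  | [] => fallback.getD candidate_edge
  | (e, fr, t) :: rest =>
    if PySem.Str.isIn key e then e
    else
      let fallback' := if fallback.isNone && (t == te || fr == ts) then some e else fallback
      pvAltLoop key ts te candidate_edge fallback' rest

def resolve_side_spawn_edge_alt (side_idx : Int) (edges_graph : List (String × String × String)) (candidate_edge : String) : String :=
  if edges_graph = [] then candidate_edge
  else
    let key := if side_idx == 1 then "side1" else "side2"
    let target_start := "s" ++ PySem.Int.toStr side_idx ++ "a"
    let target_end := "s" ++ PySem.Int.toStr side_idx ++ "b"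
    pvAltLoop key target_start target_end candidate_edge none edges_graph

-- ===== PRECONDITION & SPEC =====
def Spec_resolve_side_spawn_edge (side_idx : Int) (edges_graph : List (String × String × String)) (candidate_edge : String) (out : String) : Prop := out = resolve_side_spawn_edge_alt side_idx edges_graph candidate_edge
instance (side_idx : Int) (edges_graph : List (String × String × String)) (candidate_edge : String) (out : String) : Decidable (Spec_resolve_side_spawn_edge side_idx edges_graph candidate_edge out) := by unfold Spec_resolve_side_spawn_edge; infer_instance

-- ===== CLAIM (what is proved, stated in full; the proofs are below) =====
def Claim_equal_resolve_side_spawn_edge : Prop := ∀ (side_idx : Int) (edges_graph : List (String × String × String)) (candidate_edge : String), Dom_resolve_side_spawn_edge side_idx edges_graph candidate_edge → Spec_resolve_side_spawn_edge side_idx edges_graph candidate_edge (resolve_side_spawn_edge side_idx edges_graph candidate_edge)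

-- ===== LEMMAS AND PROOFS =====
lemma pvAltLoop_eq (key ts te cand : String) (fallback : Option String)
    (l : List (String × String × String)) :
    pvAltLoop key ts te cand fallback l =
      match pvScanKey key l with
      | some e => e
      | none => ((fallback).orElse (fun _ => pvScanEnds ts te l)).getD cand := by
  induction l generalizing fallback with
  | nil => cases fallback <;> simp [pvAltLoop, pvScanKey, pvScanEnds, Option.orElse]
  | cons hd tl ih =>
    obtain ⟨e, fr, t⟩ := hd
    simp only [pvAltLoop, pvScanKey, pvScanEnds]
    by_cases hk : PySem.Str.isIn key e = true
    · simp only [hk]; simp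
    · simp only [Bool.not_eq_true] at hk
      simp only [hk]
      rw [ih]
      cases fallback with
      | some f => simp [Option.orElse]
      | none =>
        by_cases hm : (t == te || fr == ts) = true
        · simp [hm, Option.orElse]
        · simp only [Bool.not_eq_true] at hm
          simp [hm, Option.orElse]

-- ===== VERDICT (by name: the statement is the Claim_ definition above) =====
theorem resolve_side_spawn_edge_spec : Claim_equal_resolve_side_spawn_edge := by
  intro side_idx edges_graph candidate_edge _
  unfold Spec_resolve_side_spawn_edge resolve_side_spawn_edge resolve_side_spawn_edge_alt
  by_cases he : edges_graph = []
  · simp [he]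
  · simp only [he, if_false]
    rw [pvAltLoop_eq]
    cases pvScanKey (if side_idx == 1 then "side1" else "side2") edges_graph with
    | some e => rfl
    | none =>
      simp only [Option.orElse]
      cases pvScanEnds ("s" ++ PySem.Int.toStr side_idx ++ "a")
          ("s" ++ PySem.Int.toStr side_idx ++ "b") edges_graph <;> rfl
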